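-- pv_equiv track=rewrite | github.com/ISE-FIZKarlsruhe/ODP-Reuse | MultiSource/odp_stats.py | _levenshtein_bound
-- ===== SOURCE A (Python) =====
-- from typing import Dict, Set, Tuple, List, Optional
--
-- def _levenshtein_bound(a: str, b: str, max_edits: Optional[int] = None) -> int:
--     if a == b: return 0
--     la, lb = len(a), len(b)
--     if la == 0: return lb
--     if lb == 0: return la
--     if max_edits is not None and abs(la - lb) > max_edits:
--         return max_edits + 1
--     if la > lb:
--         a, b = b, a
--         la, lb = lb, la
--     prev = list(range(la + 1))
--     for j in range(1, lb + 1):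
--         cj = b[j - 1]
--         cur = [j]
--         if max_edits is not None:
--             i_start = max(1, j - max_edits)
--             i_end   = min(la, j + max_edits)
--             if i_start > 1:
--                 cur.extend([max_edits + 1] * (i_start - 1))
--         else:
--             i_start, i_end = 1, la
--         row_min = cur[-1]
--         for i in range(i_start, i_end + 1):
--             cost = 0 if a[i - 1] == cj else 1
--             ins  = cur[-1] + 1
--             dele = prev[i] + 1
--             sub  = prev[i - 1] + cost
--             v = min(ins, dele, sub)
--             cur.append(v)
--             if v < row_min: row_min = v
--         if max_edits is not None and i_end < la:
--             cur.extend([max_edits + 1] * (la - i_end))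
--         if max_edits is not None and row_min > max_edits:
--             return max_edits + 1
--         prev = cur
--     return prev[-1]
-- ===== SOURCE B (Python) =====
-- from typing import Optional
--
-- def _levenshtein_bound(a: str, b: str, max_edits: Optional[int] = None) -> int:
--     if a == b:
--         return 0
--     if not a:
--         return len(b)
--     if not b:
--         return len(a)
--     if max_edits is not None and abs(len(a) - len(b)) > max_edits:
--         return max_edits + 1
--     if len(a) > len(b):
--         a, b = b, a
--     # plain (unbanded) rolling-row DP, no index arithmetic: each new row is a
--     # scan over (diagonal, above, char) triples; cutoff = whole-row minimum.
--     prev = list(range(len(a) + 1))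
--     for j, cj in enumerate(b, 1):
--         cur = [j]
--         for pd, pr, ca in zip(prev, prev[1:], a):
--             cur.append(min(cur[-1] + 1, pr + 1, pd + (ca != cj)))
--         if max_edits is not None and min(cur) > max_edits:
--             return max_edits + 1
--         prev = cur
--     return prev[-1]
-- ===== Notes on version B (the rewrite author's own statement) =====
-- stated objective: simpler
-- what changed: Replaced the banded DP (per-row band bounds i_start/i_end, sentinel fills max_edits+1, incremental row_min) by the plain full-row rolling DP written as a zip-scan over (diagonal, above, char) triples with no index arithmetic; the cutoff is kept as the natural whole-row-minimum early exit, which provably yields the same value on every input.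
import Mathlib
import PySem

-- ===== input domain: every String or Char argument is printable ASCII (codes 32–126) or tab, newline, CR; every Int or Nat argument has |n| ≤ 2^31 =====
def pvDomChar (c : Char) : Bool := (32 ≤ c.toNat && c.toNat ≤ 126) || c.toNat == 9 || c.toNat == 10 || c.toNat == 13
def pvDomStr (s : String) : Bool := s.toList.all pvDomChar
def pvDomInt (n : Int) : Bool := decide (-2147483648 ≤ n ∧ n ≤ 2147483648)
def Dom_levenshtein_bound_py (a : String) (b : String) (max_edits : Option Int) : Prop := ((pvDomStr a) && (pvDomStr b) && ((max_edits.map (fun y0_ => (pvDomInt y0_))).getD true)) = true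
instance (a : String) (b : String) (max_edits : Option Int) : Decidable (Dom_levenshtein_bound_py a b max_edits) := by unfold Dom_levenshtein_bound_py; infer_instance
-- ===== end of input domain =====

-- B replaces A's banded DP (band bounds, sentinel fills, incremental row minimum) by the
-- plain full-row rolling DP written as a zip-scan, keeping the whole-row-minimum cutoff;
-- objective: simpler.

-- ===== PORT A =====
-- inner loop 'for i in range(i_start, i_end + 1)' of A (indices always in range: pyGetD's
-- default 0 is never the result on the admitted inputs)
def levA_inner (a : String) (cj : Option Char) (prev : List Int) (i_start i_end : Int)
    (cur0 : List Int) (rm0 : Int) : List Int × Int :=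
  (PySem.List.pyRange i_start (i_end + 1) 1).foldl (fun pr i =>
    match pr with
    | (cur, row_min) =>
      let cost : Int := if PySem.Str.pyGet? a (i - 1) == cj then 0 else 1
      let ins := PySem.List.pyGetD cur (-1) 0 + 1
      let dele := PySem.List.pyGetD prev i 0 + 1
      let sub := PySem.List.pyGetD prev (i - 1) 0 + cost
      let v := min ins (min dele sub)
      (cur ++ [v], if v < row_min then v else row_min)) (cur0, rm0)

-- one iteration of A's outer loop 'for j in range(1, lb + 1)' (Sum.inl r = the function
-- already returned r via the cutoff branch)
def levA_step (a b : String) (la : Int) (max_edits : Option Int)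
    (st : Sum Int (List Int)) (j : Int) : Sum Int (List Int) :=
  match st with
  | Sum.inl r => Sum.inl r
  | Sum.inr prev =>
    let cj := PySem.Str.pyGet? b (j - 1)
    let cur0 : List Int := [j]
    match (match max_edits with
           | some me =>
             (max 1 (j - me), min la (j + me),
              if max 1 (j - me) > 1 then cur0 ++ PySem.List.pyRepeat [me + 1] (max 1 (j - me) - 1) else cur0)
           | none => ((1 : Int), la, cur0)) with
    | (i_start, i_end, cur1) =>
      match levA_inner a cj prev i_start i_end cur1 (PySem.List.pyGetD cur1 (-1) 0) with
      | (cur2, row_min) =>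
        let cur3 := match max_edits with
          | some me => if i_end < la then cur2 ++ PySem.List.pyRepeat [me + 1] (la - i_end) else cur2
          | none => cur2
        match max_edits with
        | some me => if row_min > me then Sum.inl (me + 1) else Sum.inr cur3
        | none => Sum.inr cur3

-- the swap + DP part of A after the early-return guards
def levA_go (a0 b0 : String) (la0 lb0 : Int) (max_edits : Option Int) : Int :=
  match (if la0 > lb0 then (b0, a0, lb0, la0) else (a0, b0, la0, lb0)) with
  | (a, b, la, lb) =>
    let prev0 : List Int := PySem.List.pyRange 0 (la + 1) 1
    match (PySem.List.pyRange 1 (lb + 1) 1).foldl (levA_step a b la max_edits) (Sum.inr prev0) with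
    | Sum.inl r => r
    | Sum.inr prev => PySem.List.pyGetD prev (-1) 0

def levenshtein_bound_py (a : String) (b : String) (max_edits : Option Int) : Int :=
  if a == b then 0 else
  let la : Int := PySem.Str.len a
  let lb : Int := PySem.Str.len b
  if la == 0 then lb
  else if lb == 0 then la
  else match max_edits with
    | some me => if |la - lb| > me then me + 1 else levA_go a b la lb (some me)
    | none => levA_go a b la lb none

-- ===== PORT B =====
-- one iteration of B's outer loop 'for j, cj in enumerate(b, 1)'; the inner loop
-- 'for pd, pr, ca in zip(prev, prev[1:], a)' appends to cur (cur[-1] = last value);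
-- Python's min(cur) is PySem.List.min? (cur is never empty, so the none branch is unreachable)
def levB_step (a : String) (max_edits : Option Int)
    (st : Sum Int (Int × List Int)) (cj : Char) : Sum Int (Int × List Int) :=
  match st with
  | Sum.inl r => Sum.inl r
  | Sum.inr (j, prev) =>
    let cur := ((prev.zip (PySem.List.slice prev (some 1) none)).zip a.toList).foldl
      (fun cur t =>
        match t with
        | ((pd, pr), ca) =>
          cur ++ [min (PySem.List.pyGetD cur (-1) 0 + 1)
                   (min (pr + 1) (pd + (if ca == cj then (0 : Int) else 1)))]) [j]
    match max_edits with
    | some me =>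
      match PySem.List.min? cur (fun x => x) with
      | some mn => if mn > me then Sum.inl (me + 1) else Sum.inr (j + 1, cur)
      | none => Sum.inr (j + 1, cur)
    | none => Sum.inr (j + 1, cur)

def levB_go (a0 b0 : String) (max_edits : Option Int) : Int :=
  match (if PySem.Str.len a0 > PySem.Str.len b0 then (b0, a0) else (a0, b0)) with
  | (a, b) =>
    let prev0 : List Int := PySem.List.pyRange 0 (PySem.Str.len a + 1) 1
    match b.toList.foldl (levB_step a max_edits) (Sum.inr ((1 : Int), prev0)) with
    | Sum.inl r => r
    | Sum.inr (_, prev) => PySem.List.pyGetD prev (-1) 0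

def levenshtein_bound_py_alt (a : String) (b : String) (max_edits : Option Int) : Int :=
  if a == b then 0 else
  if PySem.Str.len a == 0 then PySem.Str.len b
  else if PySem.Str.len b == 0 then PySem.Str.len a
  else match max_edits with
    | some me => if |PySem.Str.len a - PySem.Str.len b| > me then me + 1 else levB_go a b (some me)
    | none => levB_go a b none

-- ===== PRECONDITION & SPEC =====
def Spec_levenshtein_bound_py (a : String) (b : String) (max_edits : Option Int) (out : Int) : Prop := out = levenshtein_bound_py_alt a b max_edits
instance (a : String) (b : String) (max_edits : Option Int) (out : Int) : Decidable (Spec_levenshtein_bound_py a b max_edits out) := by unfold Spec_levenshtein_bound_py; infer_instance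

-- ===== CLAIM (what is proved, stated in full; the proofs are below) =====
def Claim_equal_levenshtein_bound_py : Prop := ∀ (a : String) (b : String) (max_edits : Option Int), Dom_levenshtein_bound_py a b max_edits → Spec_levenshtein_bound_py a b max_edits (levenshtein_bound_py a b max_edits)

-- ===== LEMMAS AND PROOFS =====

def pvCost (u v : List Char) (i j : Nat) : Int := if u[i]? = v[j]? then 0 else 1

def pvCell (u v : List Char) : Nat → Nat → Int
  | i, 0 => (i : Int)
  | 0, j + 1 => ((j : Int) + 1)
  | i + 1, j + 1 =>
    min (pvCell u v i (j + 1) + 1)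
      (min (pvCell u v (i + 1) j + 1) (pvCell u v i j + pvCost u v i j))
termination_by i j => (j, i)

lemma pvCost_nonneg (u v : List Char) (i j : Nat) : 0 ≤ pvCost u v i j := by
  unfold pvCost; split <;> omega

lemma pvCost_le_one (u v : List Char) (i j : Nat) : pvCost u v i j ≤ 1 := by
  unfold pvCost; split <;> omega

lemma pvCell_lb (u v : List Char) (i j : Nat) :
    (i : Int) - j ≤ pvCell u v i j ∧ (j : Int) - i ≤ pvCell u v i j := by
  fun_induction pvCell u v i j with
  | case1 i => omega
  | case2 j => omega
  | case3 i j ih1 ih2 ih3 =>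
    have hc := pvCost_nonneg u v i j
    rw [min_def, min_def]
    push_cast at *
    split <;> split <;> omega

lemma pvCell_zero_left (u v : List Char) (j : Nat) : pvCell u v 0 j = (j : Int) := by
  cases j <;> simp [pvCell]

lemma pvCell_succ_le (u v : List Char) (i j : Nat) :
    pvCell u v (i + 1) j ≤ pvCell u v i j + 1 := by
  cases j with
  | zero => simp [pvCell]
  | succ j => rw [pvCell]; exact min_le_left _ _

lemma pvCell_le_add (u v : List Char) (i k j : Nat) :
    pvCell u v (i + k) j ≤ pvCell u v i j + k := by
  induction k with
  | zero => simp
  | succ k ih =>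
    have h1 := pvCell_succ_le u v (i + k) j
    have h2 : i + (k + 1) = i + k + 1 := by omega
    rw [h2]
    push_cast
    omega

def pvBCell (u v : List Char) (me : Int) : Nat → Nat → Int
  | i, 0 => (i : Int)
  | 0, j + 1 => ((j : Int) + 1)
  | i + 1, j + 1 =>
    if ((i : Int) + 1) < ((j : Int) + 1) - me ∨ ((j : Int) + 1) + me < ((i : Int) + 1) then me + 1
    else
      min (pvBCell u v me i (j + 1) + 1)
        (min (pvBCell u v me (i + 1) j + 1) (pvBCell u v me i j + pvCost u v i j))
termination_by i j => (j, i)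

lemma pvCell_succ (u v : List Char) (i j : Nat) :
    pvCell u v (i + 1) (j + 1) =
      min (pvCell u v i (j + 1) + 1)
        (min (pvCell u v (i + 1) j + 1) (pvCell u v i j + pvCost u v i j)) := by
  rw [pvCell]

lemma pvBCell_le (u v : List Char) (me : Int) (i j : Nat) :
    pvBCell u v me i j ≤ pvCell u v i j := by
  fun_induction pvBCell u v me i j with
  | case1 i => simp [pvCell]
  | case2 j => rw [pvCell_zero_left]; push_cast; omega
  | case3 i j hband =>
    have hlb := pvCell_lb u v (i + 1) (j + 1)
    simp only [Nat.succ_eq_add_one] at *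
    push_cast at *
    omega
  | case4 i j hband ih1 ih2 ih3 =>
    simp only [Nat.succ_eq_add_one] at *
    rw [pvCell_succ]
    have hc0 := pvCost_nonneg u v i j
    simp only [le_min_iff, min_le_iff] at *
    omega

lemma pvBCell_ge (u v : List Char) (me : Int) (i j : Nat) :
    min (pvCell u v i j) (min ((i : Int) - j + 2 * me + 2) ((j : Int) - i + 2 * me + 2))
      ≤ pvBCell u v me i j := by
  fun_induction pvBCell u v me i j with
  | case1 i => simp [pvCell]
  | case2 j =>
    rw [pvCell_zero_left]
    simp only [Nat.succ_eq_add_one]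
    push_cast
    omega
  | case3 i j hband =>
    simp only [Nat.succ_eq_add_one] at *
    push_cast at *
    simp only [min_le_iff]
    omega
  | case4 i j hband ih1 ih2 ih3 =>
    simp only [Nat.succ_eq_add_one] at *
    rw [pvCell_succ] at *
    have hc0 := pvCost_nonneg u v i j
    have hc1 := pvCost_le_one u v i j
    push_cast at *
    simp only [le_min_iff, min_le_iff] at *
    omega

def pvBad (u v : List Char) (me : Int) (j : Nat) : Prop :=
  ∀ i : Nat, i ≤ u.length → me < pvCell u v i j

lemma pvBCell_final (u v : List Char) (me : Int)
    (hmn : u.length ≤ v.length)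
    (hex : ¬ pvBad u v me v.length) :
    pvBCell u v me u.length v.length = pvCell u v u.length v.length := by
  unfold pvBad at hex
  push Not at hex
  obtain ⟨i0, hi0m, hi0⟩ := hex
  set m := u.length
  set n := v.length
  have h1 : (n : Int) - i0 ≤ pvCell u v i0 n := (pvCell_lb u v i0 n).2
  have h2 : pvCell u v m n ≤ pvCell u v i0 n + (m - i0 : Nat) := by
    have := pvCell_le_add u v i0 (m - i0) n
    have he : i0 + (m - i0) = m := by omega
    rw [he] at this
    exact this
  have h3 : pvCell u v m n ≤ (m : Int) - n + 2 * me := by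
    have hcast : ((m - i0 : Nat) : Int) = (m : Int) - i0 := by omega
    omega
  have hub := pvBCell_le u v me m n
  have hlo := pvBCell_ge u v me m n
  have : min (pvCell u v m n) (min ((m : Int) - n + 2 * me + 2) ((n : Int) - m + 2 * me + 2))
      = pvCell u v m n := by
    simp only [min_eq_left_iff, le_min_iff]
    omega
  omega

-- A's windowed row minimum exceeds me iff the whole full row exceeds me

lemma pvBadWindow (u v : List Char) (me : Int) (hme : 0 ≤ me) (j : Nat) (hj1 : 1 ≤ j) :
    (∀ i : Nat, max 1 ((j : Int) - me) - 1 ≤ (i : Int) → (i : Int) ≤ min (u.length : Int) ((j : Int) + me) →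
        me < pvBCell u v me i j) ↔ pvBad u v me j := by
  constructor
  · intro h i him
    by_cases hlo : max 1 ((j : Int) - me) - 1 ≤ (i : Int)
    · by_cases hhi : (i : Int) ≤ min (u.length : Int) ((j : Int) + me)
      · exact lt_of_lt_of_le (h i hlo hhi) (pvBCell_le u v me i j)
      · -- right of the window: i > j + me, the cell is at least i - j > me
        have := (pvCell_lb u v i j).1
        simp only [min_le_iff, not_le] at hhi
        omega
    · -- left of the window: j - i > me + 1
      have := (pvCell_lb u v i j).2
      simp only [not_le] at hlo
      omega
  · intro h i hlo hhi
    have hge := pvBCell_ge u v me i j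
    have him : i ≤ u.length := by
      have := le_min_iff.mp (le_of_eq (rfl : min (u.length:Int) ((j:Int)+me) = _))
      omega
    have hcell := h i him
    simp only [le_min_iff, min_le_iff] at hge hhi
    omega

lemma pvScanl_eq_map_range {α : Type} (f : Int → α → Int) (l : List α) (s : Int)
    (F : Nat → Int) (h0 : F 0 = s)
    (hstep : ∀ k, (hk : k < l.length) → F (k + 1) = f (F k) l[k]) :
    List.scanl f s l = (List.range (l.length + 1)).map F := by
  induction l generalizing s F with
  | nil => simp [List.scanl, h0]
  | cons x t ih =>
    rw [List.scanl_cons]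
    have h1 : F 1 = f s x := by
      have := hstep 0 (by simp)
      simpa [h0] using this
    have := ih (f s x) (fun k => F (k + 1)) h1
      (fun k hk => by simpa using hstep (k + 1) (by simpa using Nat.succ_lt_succ hk))
    rw [this]
    conv_rhs => rw [List.length_cons, List.range_succ_eq_map]
    simp [h0, Function.comp_def]

lemma pvFoldl_append_last {α : Type} (f : Int → α → Int) (l : List α) (pre : List Int) (s : Int) :
    l.foldl (fun cur x => cur ++ [f (PySem.List.pyGetD cur (-1) 0) x]) (pre ++ [s]) =
      pre ++ List.scanl f s l := by
  induction l generalizing pre s with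
  | nil => simp [List.scanl]
  | cons x t ih =>
    rw [List.foldl_cons, List.scanl_cons]
    rw [PySem.List.pyGetD_neg_one_append_singleton]
    rw [ih (pre ++ [s]) (f s x)]
    simp

lemma pvGetD_map_range (F : Nat → Int) (n : Nat) (i : Int) (h0 : 0 ≤ i) (h1 : i < (n : Int)) :
    PySem.List.pyGetD ((List.range n).map F) i 0 = F i.toNat := by
  rw [PySem.List.pyGetD_eq_getElem _ 0 h0 (by simpa using h1)]
  have hi : i.toNat < n := by omega
  simp

lemma pvMap_pyRange_succ (h : Int → Int) (t : Int) (ht : 0 ≤ t) :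
    (PySem.List.pyRange 0 (t + 1) 1).map h = (PySem.List.pyRange 0 t 1).map h ++ [h t] := by
  rw [PySem.List.pyRange_one_succ_right ht, List.map_append]
  rfl

lemma pvLast_map_pyRange (h : Int → Int) (t : Int) (ht : 0 ≤ t) :
    PySem.List.pyGetD ((PySem.List.pyRange 0 (t + 1) 1).map h) (-1) 0 = h t := by
  rw [pvMap_pyRange_succ h t ht]
  exact PySem.List.pyGetD_neg_one_append_singleton _ _ _

lemma levA_inner_spec (a : String) (cj : Option Char) (prev : List Int)
    (i_start i_end : Int) (g h : Int → Int)
    (h1 : 1 ≤ i_start) (h2 : i_start ≤ i_end + 1)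
    (hg : ∀ i : Int, i_start - 1 ≤ i → i ≤ i_end → PySem.List.pyGetD prev i 0 = g i)
    (hrec : ∀ i : Int, i_start ≤ i → i ≤ i_end →
      h i = min (h (i - 1) + 1)
        (min (g i + 1) (g (i - 1) + (if PySem.Str.pyGet? a (i - 1) == cj then (0 : Int) else 1)))) :
    levA_inner a cj prev i_start i_end ((PySem.List.pyRange 0 i_start 1).map h) (h (i_start - 1)) =
      ((PySem.List.pyRange 0 (i_end + 1) 1).map h,
       ((PySem.List.pyRange i_start (i_end + 1) 1).map h).foldl min (h (i_start - 1))) := by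
  unfold levA_inner
  -- generalized invariant: after processing i_start..t the state is row prefix 0..t and its min
  have main : ∀ t : Int, i_start - 1 ≤ t → t ≤ i_end →
      (PySem.List.pyRange i_start (t + 1) 1).foldl (fun pr i =>
        match pr with
        | (cur, row_min) =>
          let cost : Int := if PySem.Str.pyGet? a (i - 1) == cj then 0 else 1
          let ins := PySem.List.pyGetD cur (-1) 0 + 1
          let dele := PySem.List.pyGetD prev i 0 + 1
          let sub := PySem.List.pyGetD prev (i - 1) 0 + cost
          let v := min ins (min dele sub)
          (cur ++ [v], if v < row_min then v else row_min))
        (((PySem.List.pyRange 0 i_start 1).map h), h (i_start - 1)) =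
      ((PySem.List.pyRange 0 (t + 1) 1).map h,
       ((PySem.List.pyRange i_start (t + 1) 1).map h).foldl min (h (i_start - 1))) := by
    intro t ht
    induction t, ht using Int.le_induction with
    | base =>
      rw [show i_start - 1 + 1 = i_start from by ring]
      rw [PySem.List.pyRange_one_eq_nil (le_refl i_start)]
      simp
    | succ t ht ih =>
      intro hle
      rw [show t + 1 + 1 = (t + 1) + 1 from rfl]
      rw [PySem.List.pyRange_one_succ_right (by omega), List.foldl_append,
          ih (by omega), List.foldl_cons, List.foldl_nil]
      have hlast : PySem.List.pyGetD ((PySem.List.pyRange 0 (t + 1) 1).map h) (-1) 0 = h t :=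
        pvLast_map_pyRange h t (by omega)
      have hgd : PySem.List.pyGetD prev (t + 1) 0 = g (t + 1) := hg _ (by omega) (by omega)
      have hgd2 : PySem.List.pyGetD prev (t + 1 - 1) 0 = g (t + 1 - 1) := hg _ (by omega) (by omega)
      have e1 : t + 1 - 1 = t := by ring
      have hv : min (PySem.List.pyGetD ((PySem.List.pyRange 0 (t + 1) 1).map h) (-1) 0 + 1)
            (min (PySem.List.pyGetD prev (t + 1) 0 + 1)
              (PySem.List.pyGetD prev (t + 1 - 1) 0 +
                (if PySem.Str.pyGet? a (t + 1 - 1) == cj then (0 : Int) else 1))) = h (t + 1) := by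
        rw [hlast, hgd, hgd2, e1, hrec (t + 1) (by omega) (by omega), e1]
      simp only []
      rw [hv]
      simp only [Prod.mk.injEq]
      refine ⟨(pvMap_pyRange_succ h (t + 1) (by omega)).symm, ?_⟩
      rw [List.map_append, List.foldl_append, List.map_singleton, List.foldl_cons, List.foldl_nil]
      rw [min_def]
      split_ifs <;> omega
  have := main i_end (by omega) (le_refl i_end)
  exact this

def pvRow (u v : List Char) (j : Nat) : List Int :=
  (List.range (u.length + 1)).map (fun i => pvCell u v i j)

def pvBRow (u v : List Char) (me : Int) (j : Nat) : List Int :=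
  (List.range (u.length + 1)).map (fun i => pvBCell u v me i j)

lemma pvMap_pyRange_natCast (h : Int → Int) (k : Nat) :
    (PySem.List.pyRange 0 (k : Int) 1).map h = (List.range k).map (fun i : Nat => h (i : Int)) := by
  rw [PySem.List.pyRange_zero_nat, List.map_map]
  simp only [Function.comp_def]

lemma pvBCell_succ (u v : List Char) (me : Int) (i j : Nat) :
    pvBCell u v me (i + 1) (j + 1) =
      if ((i : Int) + 1) < ((j : Int) + 1) - me ∨ ((j : Int) + 1) + me < ((i : Int) + 1) then me + 1
      else
        min (pvBCell u v me i (j + 1) + 1)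
          (min (pvBCell u v me (i + 1) j + 1) (pvBCell u v me i j + pvCost u v i j)) := by
  rw [pvBCell]

lemma pvRowB_eq (u v : List Char) (me : Int) (j : Nat) :
    (PySem.List.pyRange 0 ((u.length : Int) + 1) 1).map (fun i => pvBCell u v me i.toNat j)
      = pvBRow u v me j := by
  rw [show ((u.length : Int) + 1) = ((u.length + 1 : Nat) : Int) from by push_cast; ring]
  rw [pvMap_pyRange_natCast]
  unfold pvBRow
  exact List.map_congr_left fun x hx => by simp

lemma pvRowF_eq (u v : List Char) (j : Nat) :
    (PySem.List.pyRange 0 ((u.length : Int) + 1) 1).map (fun i => pvCell u v i.toNat j)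
      = pvRow u v j := by
  rw [show ((u.length : Int) + 1) = ((u.length + 1 : Nat) : Int) from by push_cast; ring]
  rw [pvMap_pyRange_natCast]
  unfold pvRow
  exact List.map_congr_left fun x hx => by simp

-- the recurrence hypothesis of levA_inner_spec, full-cell version

lemma pvHrecF (a b : String) (t : Nat) (i : Int) (hi0 : 1 ≤ i)
    (hi1 : i ≤ (a.toList.length : Int)) (ht : t < b.toList.length) :
    (fun i : Int => pvCell a.toList b.toList i.toNat (t + 1)) i =
      min ((fun i : Int => pvCell a.toList b.toList i.toNat (t + 1)) (i - 1) + 1)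
        (min ((fun i : Int => pvCell a.toList b.toList i.toNat t) i + 1)
          ((fun i : Int => pvCell a.toList b.toList i.toNat t) (i - 1) +
            (if PySem.Str.pyGet? a (i - 1) == PySem.Str.pyGet? b ((t : Int) + 1 - 1) then (0 : Int) else 1))) := by
  simp only []
  obtain ⟨k, hk⟩ : ∃ k, i.toNat = k + 1 := ⟨i.toNat - 1, by omega⟩
  have e1 : (i - 1).toNat = k := by omega
  have hcost : (if PySem.Str.pyGet? a (i - 1) == PySem.Str.pyGet? b ((t : Int) + 1 - 1) then (0 : Int) else 1)
      = pvCost a.toList b.toList k t := by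
    rw [show (i - 1 : Int) = ((k : Nat) : Int) from by omega,
        show ((t : Int) + 1 - 1) = ((t : Nat) : Int) from by ring,
        PySem.Str.pyGet?_natCast, PySem.Str.pyGet?_natCast]
    unfold pvCost
    rcases Decidable.em (a.toList[k]? = b.toList[t]?) with he | he <;> simp [he]
  rw [hk, e1, hcost, pvCell_succ]

-- the same, banded version (i inside the band window)

lemma pvHrecB (a b : String) (me : Int) (t : Nat) (i : Int) (hi0 : 1 ≤ i)
    (hi1 : i ≤ (a.toList.length : Int)) (ht : t < b.toList.length)
    (hbl : (t : Int) + 1 - me ≤ i) (hbr : i ≤ (t : Int) + 1 + me) :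
    (fun i : Int => pvBCell a.toList b.toList me i.toNat (t + 1)) i =
      min ((fun i : Int => pvBCell a.toList b.toList me i.toNat (t + 1)) (i - 1) + 1)
        (min ((fun i : Int => pvBCell a.toList b.toList me i.toNat t) i + 1)
          ((fun i : Int => pvBCell a.toList b.toList me i.toNat t) (i - 1) +
            (if PySem.Str.pyGet? a (i - 1) == PySem.Str.pyGet? b ((t : Int) + 1 - 1) then (0 : Int) else 1))) := by
  simp only []
  obtain ⟨k, hk⟩ : ∃ k, i.toNat = k + 1 := ⟨i.toNat - 1, by omega⟩
  have e1 : (i - 1).toNat = k := by omega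
  have hcost : (if PySem.Str.pyGet? a (i - 1) == PySem.Str.pyGet? b ((t : Int) + 1 - 1) then (0 : Int) else 1)
      = pvCost a.toList b.toList k t := by
    rw [show (i - 1 : Int) = ((k : Nat) : Int) from by omega,
        show ((t : Int) + 1 - 1) = ((t : Nat) : Int) from by ring,
        PySem.Str.pyGet?_natCast, PySem.Str.pyGet?_natCast]
    unfold pvCost
    rcases Decidable.em (a.toList[k]? = b.toList[t]?) with he | he <;> simp [he]
  rw [hk, e1, hcost, pvBCell_succ]
  rw [if_neg (by push_cast; omega)]

lemma levA_step_none (a b : String) (t : Nat)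
    (hm : 1 ≤ a.toList.length) (ht : t < b.toList.length) :
    levA_step a b (a.toList.length : Int) none (Sum.inr (pvRow a.toList b.toList t)) ((t : Int) + 1)
      = Sum.inr (pvRow a.toList b.toList (t + 1)) := by
  have hspec := levA_inner_spec a (PySem.Str.pyGet? b ((t : Int) + 1 - 1))
    (pvRow a.toList b.toList t) 1 (a.toList.length : Int)
    (fun i : Int => pvCell a.toList b.toList i.toNat t)
    (fun i : Int => pvCell a.toList b.toList i.toNat (t + 1))
    (le_refl 1) (by omega)
    (fun i hi0 hi1 => by
      unfold pvRow
      exact pvGetD_map_range _ _ _ (by omega) (by push_cast; omega))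
    (fun i hi0 hi1 => pvHrecF a b t i hi0 hi1 ht)
  simp only [levA_step]
  have er : PySem.List.pyRange 0 1 1 = [(0 : Int)] := by decide
  have e0 : [((t : Int) + 1)] =
      (PySem.List.pyRange 0 1 1).map (fun i : Int => pvCell a.toList b.toList i.toNat (t + 1)) := by
    rw [er]
    simp [pvCell_zero_left]
  have e1 : PySem.List.pyGetD
      ((PySem.List.pyRange 0 1 1).map (fun i : Int => pvCell a.toList b.toList i.toNat (t + 1))) (-1) 0 =
      (fun i : Int => pvCell a.toList b.toList i.toNat (t + 1)) (1 - 1) := by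
    rw [er]
    norm_num
    exact (PySem.List.pyGetD_neg_one_append_singleton [] _ _)
  rw [e0, e1, hspec, pvRowF_eq]

lemma pvBCell_zero_left (u v : List Char) (j : Nat) : pvBCell u v me 0 j = (j : Int) := by
  cases j <;> simp [pvBCell]

lemma pvMap_const (lo hi : Int) (h : Int → Int) (c : Int)
    (hc : ∀ i : Int, lo ≤ i → i < hi → h i = c) :
    (PySem.List.pyRange lo hi 1).map h = List.replicate (hi - lo).toNat c := by
  apply List.eq_replicate_iff.mpr
  refine ⟨by simp [PySem.List.length_pyRange_one], ?_⟩
  intro x hx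
  obtain ⟨i, hi, rfl⟩ := List.mem_map.mp hx
  have := PySem.List.mem_pyRange_one.mp hi
  exact hc i this.1 this.2

lemma pvFoldMin_gt (l : List Int) (s x : Int) :
    x < l.foldl min s ↔ x < s ∧ ∀ y ∈ l, x < y := by
  induction l generalizing s with
  | nil => simp
  | cons h t ih =>
    simp only [List.foldl_cons, ih, List.mem_cons]
    constructor
    · rintro ⟨h1, h2⟩
      have hs : x < s := lt_of_lt_of_le h1 (min_le_left s h)
      have hh : x < h := lt_of_lt_of_le h1 (min_le_right s h)
      refine ⟨hs, fun y hy => ?_⟩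
      rcases hy with rfl | hy
      · exact hh
      · exact h2 y hy
    · rintro ⟨h1, h2⟩
      have hh : x < h := h2 h (Or.inl rfl)
      exact ⟨lt_min h1 hh, fun y hy => h2 y (Or.inr hy)⟩

lemma pvHgB (a b : String) (me : Int) (t : Nat) (i : Int)
    (hi0 : 0 ≤ i) (hi1 : i ≤ (a.toList.length : Int)) :
    PySem.List.pyGetD (pvBRow a.toList b.toList me t) i 0
      = pvBCell a.toList b.toList me i.toNat t := by
  unfold pvBRow
  exact pvGetD_map_range _ _ _ hi0 (by push_cast; omega)

lemma levA_step_some_spec (a b : String) (me : Int) (t : Nat)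
    (hme : 0 ≤ me) (hm : 1 ≤ a.toList.length) (ht : t < b.toList.length)
    (hband : (b.toList.length : Int) - a.toList.length ≤ me)
    (hmn : a.toList.length ≤ b.toList.length) :
    ∃ rm : Int,
      levA_step a b (a.toList.length : Int) (some me)
          (Sum.inr (pvBRow a.toList b.toList me t)) ((t : Int) + 1)
        = (if rm > me then Sum.inl (me + 1) else Sum.inr (pvBRow a.toList b.toList me (t + 1)))
      ∧ ((rm > me) ↔ pvBad a.toList b.toList me (t + 1)) := by
  have hml : (1 : Int) ≤ (a.toList.length : Int) := by exact_mod_cast hm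
  have htl : ((t : Int)) < (b.toList.length : Int) := by exact_mod_cast ht
  have his1 : (1 : Int) ≤ max 1 ((t : Int) + 1 - me) := le_max_left _ _
  have hisle : max 1 ((t : Int) + 1 - me) ≤ min (a.toList.length : Int) ((t : Int) + 1 + me) := by
    simp only [le_min_iff, max_le_iff]
    omega
  have hsent : ∀ i : Int, 1 ≤ i → i < max 1 ((t : Int) + 1 - me) →
      (fun i : Int => pvBCell a.toList b.toList me i.toNat (t + 1)) i = me + 1 := by
    intro i hi1 hi2
    obtain ⟨k, hk⟩ : ∃ k, i.toNat = k + 1 := ⟨i.toNat - 1, by omega⟩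
    simp only []
    rw [hk, pvBCell_succ, if_pos (by left; simp only [lt_max_iff] at hi2; push_cast; omega)]
  have hpre : ∀ cc : List Int,
      cc = [((t : Int) + 1)] ++ List.replicate (max 1 ((t : Int) + 1 - me) - 1).toNat (me + 1) →
      cc = (PySem.List.pyRange 0 (max 1 ((t : Int) + 1 - me)) 1).map
        (fun i : Int => pvBCell a.toList b.toList me i.toNat (t + 1)) := by
    intro cc hcc
    rw [hcc, PySem.List.pyRange_one_append 0 1 _ (by omega) his1, List.map_append]
    congr 1
    · rw [show PySem.List.pyRange 0 1 1 = [(0 : Int)] from by decide]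
      simp [pvBCell_zero_left]
    · rw [pvMap_const 1 _ _ (me + 1) hsent]
  have hcur1 : (if max 1 ((t : Int) + 1 - me) > 1 then
        [((t : Int) + 1)] ++ PySem.List.pyRepeat [me + 1] (max 1 ((t : Int) + 1 - me) - 1)
      else [((t : Int) + 1)])
      = (PySem.List.pyRange 0 (max 1 ((t : Int) + 1 - me)) 1).map
        (fun i : Int => pvBCell a.toList b.toList me i.toNat (t + 1)) := by
    split_ifs with hgt
    · exact hpre _ (by rw [PySem.List.pyRepeat_singleton])
    · exact hpre _ (by
        have : max 1 ((t : Int) + 1 - me) = 1 := by omega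
        rw [this]
        simp)
  have hspec := levA_inner_spec a (PySem.Str.pyGet? b ((t : Int) + 1 - 1))
      (pvBRow a.toList b.toList me t)
      (max 1 ((t : Int) + 1 - me)) (min (a.toList.length : Int) ((t : Int) + 1 + me))
      (fun i : Int => pvBCell a.toList b.toList me i.toNat t)
      (fun i : Int => pvBCell a.toList b.toList me i.toNat (t + 1))
      his1 (by omega)
      (fun i hi0 hi1 => pvHgB a b me t i (by omega) (by simp only [le_min_iff] at hi1; omega))
      (fun i hi0 hi1 => pvHrecB a b me t i (by omega)
        (by simp only [le_min_iff] at hi1; omega) ht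
        (by simp only [max_le_iff] at hi0; omega)
        (by simp only [le_min_iff] at hi1; omega))
  have hsufr : ∀ i : Int, min (a.toList.length : Int) ((t : Int) + 1 + me) < (a.toList.length : Int) →
      min (a.toList.length : Int) ((t : Int) + 1 + me) + 1 ≤ i → i < (a.toList.length : Int) + 1 →
      (fun i : Int => pvBCell a.toList b.toList me i.toNat (t + 1)) i = me + 1 := by
    intro i hlt hi1 hi2
    obtain ⟨k, hk⟩ : ∃ k, i.toNat = k + 1 := ⟨i.toNat - 1, by omega⟩
    simp only []
    rw [hk, pvBCell_succ, if_pos (by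
      right
      simp only [min_lt_iff, lt_min_iff] at hlt hi1 ⊢
      push_cast
      omega)]
  have hcur3 : (if min (a.toList.length : Int) ((t : Int) + 1 + me) < (a.toList.length : Int) then
        ((PySem.List.pyRange 0 (min (a.toList.length : Int) ((t : Int) + 1 + me) + 1) 1).map
          (fun i : Int => pvBCell a.toList b.toList me i.toNat (t + 1)))
          ++ PySem.List.pyRepeat [me + 1]
              ((a.toList.length : Int) - min (a.toList.length : Int) ((t : Int) + 1 + me))
      else (PySem.List.pyRange 0 (min (a.toList.length : Int) ((t : Int) + 1 + me) + 1) 1).map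
          (fun i : Int => pvBCell a.toList b.toList me i.toNat (t + 1)))
      = pvBRow a.toList b.toList me (t + 1) := by
    split_ifs with hlt
    · have hrep : PySem.List.pyRepeat [me + 1]
          ((a.toList.length : Int) - min (a.toList.length : Int) ((t : Int) + 1 + me))
          = (PySem.List.pyRange (min (a.toList.length : Int) ((t : Int) + 1 + me) + 1)
              ((a.toList.length : Int) + 1) 1).map
            (fun i : Int => pvBCell a.toList b.toList me i.toNat (t + 1)) := by
        rw [PySem.List.pyRepeat_singleton,
            pvMap_const _ _ _ (me + 1) (fun i p q => hsufr i hlt p q)]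
        congr 1
        omega
      rw [hrep, ← List.map_append,
          ← PySem.List.pyRange_one_append 0 _ _ (by omega) (by omega)]
      exact pvRowB_eq a.toList b.toList me (t + 1)
    · have : min (a.toList.length : Int) ((t : Int) + 1 + me) = (a.toList.length : Int) := by omega
      rw [this]
      exact pvRowB_eq a.toList b.toList me (t + 1)
  refine ⟨List.foldl min
      ((fun i : Int => pvBCell a.toList b.toList me i.toNat (t + 1)) (max 1 ((t : Int) + 1 - me) - 1))
      (List.map (fun i : Int => pvBCell a.toList b.toList me i.toNat (t + 1))
        (PySem.List.pyRange (max 1 ((t : Int) + 1 - me))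
          (min (a.toList.length : Int) ((t : Int) + 1 + me) + 1) 1)), ?_, ?_⟩
  · simp only [levA_step]
    rw [hcur1]
    have hlast := pvLast_map_pyRange
      (fun i : Int => pvBCell a.toList b.toList me i.toNat (t + 1))
      (max 1 ((t : Int) + 1 - me) - 1) (by omega)
    rw [sub_add_cancel] at hlast
    rw [hlast, hspec]
    simp only []
    rw [hcur3]
  · rw [gt_iff_lt, pvFoldMin_gt]
    rw [← pvBadWindow a.toList b.toList me hme (t + 1) (by omega)]
    constructor
    · rintro ⟨h1, h2⟩ i hlo hhi
      rcases eq_or_lt_of_le hlo with he | hlt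
      · have he' : (i : Int) = max 1 ((t : Int) + 1 - me) - 1 := by push_cast at he ⊢; omega
        have : ((max 1 ((t : Int) + 1 - me) - 1)).toNat = i := by omega
        rw [← this]
        simpa using h1
      · have hmem : (fun i : Int => pvBCell a.toList b.toList me i.toNat (t + 1)) (i : Int)
            ∈ List.map (fun i : Int => pvBCell a.toList b.toList me i.toNat (t + 1))
              (PySem.List.pyRange (max 1 ((t : Int) + 1 - me))
                (min (a.toList.length : Int) ((t : Int) + 1 + me) + 1) 1) :=
          List.mem_map_of_mem (PySem.List.mem_pyRange_one.mpr ⟨by omega, by push_cast at hhi ⊢; omega⟩)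
        have := h2 _ hmem
        simpa using this
    · intro hw
      push_cast at hw
      constructor
      · have := hw (max 1 ((t : Int) + 1 - me) - 1).toNat (by push_cast; omega) (by push_cast; omega)
        simpa [show (((max 1 ((t : Int) + 1 - me) - 1).toNat : Nat) : Int)
            = max 1 ((t : Int) + 1 - me) - 1 from by omega] using this
      · intro y hy
        obtain ⟨i, hi, rfl⟩ := List.mem_map.mp hy
        have hir := PySem.List.mem_pyRange_one.mp hi
        have := hw i.toNat (by push_cast; omega) (by push_cast; omega)
        simpa [show ((i.toNat : Nat) : Int) = i from by omega] using this

lemma pvRow_length (u v : List Char) (j : Nat) : (pvRow u v j).length = u.length + 1 := by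
  unfold pvRow
  simp

-- B's inner zip-scan computes the next full row

lemma levB_row (a b : String) (t : Nat) (ht : t < b.toList.length) (cj : Char)
    (hcj : b.toList[t]'(by omega) = cj) :
    (((pvRow a.toList b.toList t).zip (PySem.List.slice (pvRow a.toList b.toList t) (some 1) none)).zip a.toList).foldl
      (fun cur x =>
        match x with
        | ((pd, pr), ca) =>
          cur ++ [min (PySem.List.pyGetD cur (-1) 0 + 1)
                   (min (pr + 1) (pd + (if ca == cj then (0 : Int) else 1)))]) [((t : Int) + 1)]
      = pvRow a.toList b.toList (t + 1) := by
  rw [PySem.List.slice_from_one]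
  have hfun : (fun (cur : List Int) (x : (Int × Int) × Char) =>
      match x with
      | ((pd, pr), ca) =>
        cur ++ [min (PySem.List.pyGetD cur (-1) 0 + 1)
                 (min (pr + 1) (pd + (if ca == cj then (0 : Int) else 1)))]) =
      (fun cur x => cur ++ [(fun (acc : Int) (x : (Int × Int) × Char) =>
        min (acc + 1) (min (x.1.2 + 1) (x.1.1 + (if x.2 == cj then (0 : Int) else 1))))
          (PySem.List.pyGetD cur (-1) 0) x]) := by
    funext cur x
    rcases x with ⟨⟨pd, pr⟩, ca⟩
    rfl
  rw [hfun]
  have hinit : [((t : Int) + 1)] = [] ++ [((t : Int) + 1)] := by simp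
  rw [hinit, pvFoldl_append_last (fun (acc : Int) (x : (Int × Int) × Char) =>
    min (acc + 1) (min (x.1.2 + 1) (x.1.1 + (if x.2 == cj then (0 : Int) else 1))))]
  set l := ((pvRow a.toList b.toList t).zip (pvRow a.toList b.toList t).tail).zip a.toList with hl
  have hlen : l.length = a.toList.length := by
    simp [hl, pvRow_length]
  rw [pvScanl_eq_map_range _ _ _ (fun i => pvCell a.toList b.toList i (t + 1))
    (by simp only []; rw [pvCell_zero_left]; push_cast; ring)
    (fun k hk => by
      have hkm : k < a.toList.length := hlen ▸ hk
      have hz : l[k]'hk = (((pvRow a.toList b.toList t)[k]'(by rw [pvRow_length]; omega),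
          ((pvRow a.toList b.toList t).tail)[k]'(by simp only [List.length_tail, pvRow_length]; omega)),
          a.toList[k]'hkm) := by
        simp [hl, List.getElem_zip]
      rw [hz]
      have hp1 : (pvRow a.toList b.toList t)[k]'(by rw [pvRow_length]; omega)
          = pvCell a.toList b.toList k t := by
        unfold pvRow
        simp
      have hp2 : ((pvRow a.toList b.toList t).tail)[k]'(by simp only [List.length_tail, pvRow_length]; omega)
          = pvCell a.toList b.toList (k + 1) t := by
        rw [List.getElem_tail]
        unfold pvRow
        simp
      rw [hp1, hp2]
      simp only []
      rw [pvCell_succ]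
      congr 1
      congr 1
      congr 1
      unfold pvCost
      rw [List.getElem?_eq_getElem hkm, List.getElem?_eq_getElem (by omega : t < b.toList.length), hcj]
      rcases Decidable.em (a.toList[k]'hkm = cj) with he | he <;> simp [he])]
  rw [hlen]
  unfold pvRow
  simp

lemma levB_step_none (a b : String) (t : Nat) (ht : t < b.toList.length) :
    levB_step a none (Sum.inr ((t : Int) + 1, pvRow a.toList b.toList t)) (b.toList[t]'ht)
      = Sum.inr ((t : Int) + 1 + 1, pvRow a.toList b.toList (t + 1)) := by
  simp only [levB_step]
  rw [levB_row a b t ht _ rfl]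

lemma levB_step_some_spec (a b : String) (me : Int) (t : Nat) (ht : t < b.toList.length) :
    ∃ mn : Int,
      levB_step a (some me) (Sum.inr ((t : Int) + 1, pvRow a.toList b.toList t)) (b.toList[t]'ht)
        = (if mn > me then Sum.inl (me + 1)
           else Sum.inr ((t : Int) + 1 + 1, pvRow a.toList b.toList (t + 1)))
      ∧ ((mn > me) ↔ pvBad a.toList b.toList me (t + 1)) := by
  simp only [levB_step]
  rw [levB_row a b t ht _ rfl]
  obtain ⟨mn, hmn⟩ : ∃ mn, PySem.List.min? (pvRow a.toList b.toList (t + 1)) (fun x => x) = some mn := by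
    cases h : PySem.List.min? (pvRow a.toList b.toList (t + 1)) (fun x => x) with
    | none =>
      exfalso
      have := (PySem.List.min?_eq_none_iff _ _).mp h
      have hlen := pvRow_length a.toList b.toList (t + 1)
      rw [this] at hlen
      simp at hlen
    | some mn => exact ⟨mn, rfl⟩
  rw [hmn]
  refine ⟨mn, rfl, ?_⟩
  constructor
  · intro hgt i him
    have hy : pvCell a.toList b.toList i (t + 1) ∈ pvRow a.toList b.toList (t + 1) := by
      unfold pvRow
      exact List.mem_map_of_mem (List.mem_range.mpr (by omega))
    have := PySem.List.min?_isMin hmn _ hy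
    simp only [] at this
    omega
  · intro hbad
    have hmem := PySem.List.min?_mem hmn
    unfold pvRow at hmem
    obtain ⟨i, hi, rfl⟩ := List.mem_map.mp hmem
    exact hbad i (by have := List.mem_range.mp hi; omega)

lemma levB_inl (a : String) (o : Option Int) (r : Int) (l : List Char) :
    l.foldl (levB_step a o) (Sum.inl r) = Sum.inl r := by
  induction l with
  | nil => rfl
  | cons x xs ih => simpa [levB_step] using ih

lemma levA_inl (a b : String) (la : Int) (o : Option Int) (r : Int) (l : List Int) :
    l.foldl (levA_step a b la o) (Sum.inl r) = Sum.inl r := by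
  induction l with
  | nil => rfl
  | cons x xs ih => simpa [levA_step] using ih

lemma levB_loop_none (a b : String) (hm : 1 ≤ a.toList.length) :
    ∀ (k t : Nat), t + k = b.toList.length →
      (b.toList.drop t).foldl (levB_step a none) (Sum.inr ((t : Int) + 1, pvRow a.toList b.toList t))
        = Sum.inr (((b.toList.length : Int)) + 1, pvRow a.toList b.toList b.toList.length) := by
  intro k
  induction k with
  | zero =>
    intro t htn
    have : t = b.toList.length := by omega
    subst this
    rw [List.drop_length]
    rfl
  | succ k ih =>
    intro t htn
    have ht : t < b.toList.length := by omega
    rw [List.drop_eq_getElem_cons ht, List.foldl_cons, levB_step_none a b t ht]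
    have := ih (t + 1) (by omega)
    rw [show ((t : Int) + 1 + 1) = (((t + 1 : Nat) : Int) + 1) from by push_cast; ring]
    exact this

lemma levB_loop_some (a b : String) (me : Int) (hm : 1 ≤ a.toList.length) :
    ∀ (k t : Nat), t + k = b.toList.length →
      ((∃ j : Nat, t < j ∧ j ≤ b.toList.length ∧ pvBad a.toList b.toList me j) ∧
        (b.toList.drop t).foldl (levB_step a (some me)) (Sum.inr ((t : Int) + 1, pvRow a.toList b.toList t))
          = Sum.inl (me + 1)) ∨
      ((¬ ∃ j : Nat, t < j ∧ j ≤ b.toList.length ∧ pvBad a.toList b.toList me j) ∧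
        (b.toList.drop t).foldl (levB_step a (some me)) (Sum.inr ((t : Int) + 1, pvRow a.toList b.toList t))
          = Sum.inr (((b.toList.length : Int)) + 1, pvRow a.toList b.toList b.toList.length)) := by
  intro k
  induction k with
  | zero =>
    intro t htn
    have : t = b.toList.length := by omega
    subst this
    right
    refine ⟨by rintro ⟨j, h1, h2, _⟩; omega, by rw [List.drop_length]; rfl⟩
  | succ k ih =>
    intro t htn
    have ht : t < b.toList.length := by omega
    rw [List.drop_eq_getElem_cons ht, List.foldl_cons]
    obtain ⟨mn, hstep, hiff⟩ := levB_step_some_spec a b me t ht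
    rw [hstep]
    by_cases hbad : pvBad a.toList b.toList me (t + 1)
    · rw [if_pos (hiff.mpr hbad), levB_inl]
      exact Or.inl ⟨⟨t + 1, by omega, by omega, hbad⟩, rfl⟩
    · rw [if_neg (fun h => hbad (hiff.mp h))]
      rw [show ((t : Int) + 1 + 1) = (((t + 1 : Nat) : Int) + 1) from by push_cast; ring]
      rcases ih (t + 1) (by omega) with ⟨⟨j, h1, h2, h3⟩, heq⟩ | ⟨hno, heq⟩
      · exact Or.inl ⟨⟨j, by omega, h2, h3⟩, heq⟩
      · refine Or.inr ⟨?_, heq⟩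
        rintro ⟨j, h1, h2, h3⟩
        rcases Nat.lt_or_ge t j with _ | _
        · rcases Nat.eq_or_lt_of_le (Nat.succ_le_of_lt h1) with he | hlt
          · exact hbad (by rwa [← he] at h3)
          · exact hno ⟨j, by omega, h2, h3⟩
        · omega

lemma levA_loop_none (a b : String) (hm : 1 ≤ a.toList.length) :
    ∀ (k t : Nat), t + k = b.toList.length →
      (PySem.List.pyRange ((t : Int) + 1) ((b.toList.length : Int) + 1) 1).foldl
          (levA_step a b (a.toList.length : Int) none) (Sum.inr (pvRow a.toList b.toList t))
        = Sum.inr (pvRow a.toList b.toList b.toList.length) := by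
  intro k
  induction k with
  | zero =>
    intro t htn
    have : t = b.toList.length := by omega
    subst this
    rw [PySem.List.pyRange_one_eq_nil (by omega)]
    rfl
  | succ k ih =>
    intro t htn
    have ht : t < b.toList.length := by omega
    rw [PySem.List.pyRange_one_cons (by push_cast; omega), List.foldl_cons,
        levA_step_none a b t hm ht]
    have := ih (t + 1) (by omega)
    rw [show ((t : Int) + 1 + 1) = (((t + 1 : Nat) : Int) + 1) from by push_cast; ring]
    exact this

lemma levA_loop_some (a b : String) (me : Int) (hme : 0 ≤ me) (hm : 1 ≤ a.toList.length)
    (hband : (b.toList.length : Int) - a.toList.length ≤ me)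
    (hmn : a.toList.length ≤ b.toList.length) :
    ∀ (k t : Nat), t + k = b.toList.length →
      ((∃ j : Nat, t < j ∧ j ≤ b.toList.length ∧ pvBad a.toList b.toList me j) ∧
        (PySem.List.pyRange ((t : Int) + 1) ((b.toList.length : Int) + 1) 1).foldl
            (levA_step a b (a.toList.length : Int) (some me)) (Sum.inr (pvBRow a.toList b.toList me t))
          = Sum.inl (me + 1)) ∨
      ((¬ ∃ j : Nat, t < j ∧ j ≤ b.toList.length ∧ pvBad a.toList b.toList me j) ∧
        (PySem.List.pyRange ((t : Int) + 1) ((b.toList.length : Int) + 1) 1).foldl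
            (levA_step a b (a.toList.length : Int) (some me)) (Sum.inr (pvBRow a.toList b.toList me t))
          = Sum.inr (pvBRow a.toList b.toList me b.toList.length)) := by
  intro k
  induction k with
  | zero =>
    intro t htn
    have : t = b.toList.length := by omega
    subst this
    right
    refine ⟨by rintro ⟨j, h1, h2, _⟩; omega, ?_⟩
    rw [PySem.List.pyRange_one_eq_nil (by omega)]
    rfl
  | succ k ih =>
    intro t htn
    have ht : t < b.toList.length := by omega
    rw [PySem.List.pyRange_one_cons (by push_cast; omega), List.foldl_cons]
    obtain ⟨rm, hstep, hiff⟩ := levA_step_some_spec a b me t hme hm ht hband hmn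
    rw [hstep]
    by_cases hbad : pvBad a.toList b.toList me (t + 1)
    · rw [if_pos (hiff.mpr hbad), levA_inl]
      exact Or.inl ⟨⟨t + 1, by omega, by omega, hbad⟩, rfl⟩
    · rw [if_neg (fun h => hbad (hiff.mp h))]
      rw [show ((t : Int) + 1 + 1) = (((t + 1 : Nat) : Int) + 1) from by push_cast; ring]
      rcases ih (t + 1) (by omega) with ⟨⟨j, h1, h2, h3⟩, heq⟩ | ⟨hno, heq⟩
      · exact Or.inl ⟨⟨j, by omega, h2, h3⟩, heq⟩
      · refine Or.inr ⟨?_, heq⟩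
        rintro ⟨j, h1, h2, h3⟩
        rcases Nat.lt_or_ge t j with _ | _
        · rcases Nat.eq_or_lt_of_le (Nat.succ_le_of_lt h1) with he | hlt
          · exact hbad (by rwa [← he] at h3)
          · exact hno ⟨j, by omega, h2, h3⟩
        · omega

lemma pvCell_zero_right (u v : List Char) (i : Nat) : pvCell u v i 0 = (i : Int) := by
  cases i <;> rw [pvCell]

lemma pvBCell_zero_right (u v : List Char) (me : Int) (i : Nat) : pvBCell u v me i 0 = (i : Int) := by
  cases i <;> rw [pvBCell]

lemma pvPrev0F (x y : String) :
    PySem.List.pyRange 0 ((x.toList.length : Int) + 1) 1 = pvRow x.toList y.toList 0 := by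
  rw [← pvRowF_eq x.toList y.toList 0]
  conv_lhs => rw [← List.map_id (PySem.List.pyRange 0 ((x.toList.length : Int) + 1) 1)]
  apply List.map_congr_left
  intro i hi
  have := PySem.List.mem_pyRange_one.mp hi
  simp [pvCell_zero_right]
  omega

lemma pvPrev0B (x y : String) (me : Int) :
    PySem.List.pyRange 0 ((x.toList.length : Int) + 1) 1 = pvBRow x.toList y.toList me 0 := by
  rw [← pvRowB_eq x.toList y.toList me 0]
  conv_lhs => rw [← List.map_id (PySem.List.pyRange 0 ((x.toList.length : Int) + 1) 1)]
  apply List.map_congr_left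
  intro i hi
  have := PySem.List.mem_pyRange_one.mp hi
  simp [pvBCell_zero_right]
  omega

lemma pvLast_map_range (F : Nat → Int) (n : Nat) :
    PySem.List.pyGetD ((List.range (n + 1)).map F) (-1) 0 = F n := by
  rw [List.range_succ, List.map_append]
  exact PySem.List.pyGetD_neg_one_append_singleton _ _ _

lemma pvLast_row (u v : List Char) (j : Nat) :
    PySem.List.pyGetD (pvRow u v j) (-1) 0 = pvCell u v u.length j := by
  unfold pvRow
  exact pvLast_map_range _ _

lemma pvLast_browe (u v : List Char) (me : Int) (j : Nat) :
    PySem.List.pyGetD (pvBRow u v me j) (-1) 0 = pvBCell u v me u.length j := by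
  unfold pvBRow
  exact pvLast_map_range _ _

lemma pvGo_eq (x y : String) (max_edits : Option Int)
    (hx : 1 ≤ x.toList.length) (hy : 1 ≤ y.toList.length)
    (hxy : x.toList.length ≤ y.toList.length)
    (hme : ∀ me, max_edits = some me → 0 ≤ me ∧ (y.toList.length : Int) - x.toList.length ≤ me) :
    (match (PySem.List.pyRange 1 ((y.toList.length : Int) + 1) 1).foldl
        (levA_step x y (x.toList.length : Int) max_edits)
        (Sum.inr (PySem.List.pyRange 0 ((x.toList.length : Int) + 1) 1)) with
     | Sum.inl r => r
     | Sum.inr prev => PySem.List.pyGetD prev (-1) 0) =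
    (match y.toList.foldl (levB_step x max_edits)
        (Sum.inr ((1 : Int), PySem.List.pyRange 0 ((x.toList.length : Int) + 1) 1)) with
     | Sum.inl r => r
     | Sum.inr (_, prev) => PySem.List.pyGetD prev (-1) 0) := by
  cases max_edits with
  | none =>
    have hA := levA_loop_none x y hx y.toList.length 0 (by omega)
    have hB := levB_loop_none x y hx y.toList.length 0 (by omega)
    rw [List.drop_zero] at hB
    simp only [Nat.cast_zero, zero_add] at hA hB
    rw [pvPrev0F x y, hA, hB]

  | some me =>
    obtain ⟨hme0, hband⟩ := hme me rfl
    have hA := levA_loop_some x y me hme0 hx hband hxy y.toList.length 0 (by omega)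
    have hB := levB_loop_some x y me hx y.toList.length 0 (by omega)
    rw [List.drop_zero] at hB
    simp only [Nat.cast_zero, zero_add] at hA hB
    conv_lhs => rw [pvPrev0B x y me]
    conv_rhs => rw [pvPrev0F x y]
    rcases hA with ⟨hexA, heqA⟩ | ⟨hnoA, heqA⟩ <;> rcases hB with ⟨hexB, heqB⟩ | ⟨hnoB, heqB⟩
    · rw [heqA, heqB]
    · exact absurd hexA hnoB
    · exact absurd hexB hnoA
    · rw [heqA, heqB]
      simp only []
      rw [pvLast_row, pvLast_browe]
      exact pvBCell_final x.toList y.toList me hxy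
        (fun hbad => hnoA ⟨y.toList.length, by omega, le_refl _, hbad⟩)

lemma pvGo_eq' (a b : String) (max_edits : Option Int)
    (ha : 1 ≤ a.toList.length) (hb : 1 ≤ b.toList.length)
    (hme : ∀ me, max_edits = some me →
      0 ≤ me ∧ |(a.toList.length : Int) - (b.toList.length : Int)| ≤ me) :
    levA_go a b (PySem.Str.len a) (PySem.Str.len b) max_edits = levB_go a b max_edits := by
  unfold levA_go levB_go
  simp only [PySem.Str.len_eq]
  by_cases hsw : ((a.toList.length : Int)) > ((b.toList.length : Int))
  · rw [if_pos hsw, if_pos hsw]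
    exact pvGo_eq b a max_edits hb ha (by omega)
      (fun me h => ⟨(hme me h).1, by have := (hme me h).2; rw [abs_le] at this; omega⟩)
  · rw [if_neg hsw, if_neg hsw]
    exact pvGo_eq a b max_edits ha hb (by omega)
      (fun me h => ⟨(hme me h).1, by have := (hme me h).2; rw [abs_le] at this; omega⟩)

theorem pvFinal (a b : String) (max_edits : Option Int) :
    levenshtein_bound_py a b max_edits = levenshtein_bound_py_alt a b max_edits := by
  unfold levenshtein_bound_py levenshtein_bound_py_alt
  by_cases hab : (a == b) = true
  · rw [if_pos hab, if_pos hab]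
  · rw [if_neg hab, if_neg hab]
    simp only []
    by_cases ha0 : (PySem.Str.len a == 0) = true
    · rw [if_pos ha0, if_pos ha0]
    · rw [if_neg ha0, if_neg ha0]
      by_cases hb0 : (PySem.Str.len b == 0) = true
      · rw [if_pos hb0, if_pos hb0]
      · rw [if_neg hb0, if_neg hb0]
        have ha1 : 1 ≤ a.toList.length := by
          rw [PySem.Str.len_eq, beq_iff_eq] at ha0
          omega
        have hb1 : 1 ≤ b.toList.length := by
          rw [PySem.Str.len_eq, beq_iff_eq] at hb0
          omega
        cases max_edits with
        | none =>
          show levA_go a b (PySem.Str.len a) (PySem.Str.len b) none = levB_go a b none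
          exact pvGo_eq' a b none ha1 hb1 (fun me h => by cases h)
        | some me =>
          show (if |PySem.Str.len a - PySem.Str.len b| > me then me + 1
              else levA_go a b (PySem.Str.len a) (PySem.Str.len b) (some me)) =
            (if |PySem.Str.len a - PySem.Str.len b| > me then me + 1 else levB_go a b (some me))
          by_cases habs : |PySem.Str.len a - PySem.Str.len b| > me
          · rw [if_pos habs, if_pos habs]
          · rw [if_neg habs, if_neg habs]
            refine pvGo_eq' a b (some me) ha1 hb1 (fun me' h => ?_)
            cases h
            rw [PySem.Str.len_eq, PySem.Str.len_eq] at habs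
            constructor
            · have : (0 : Int) ≤ |(a.toList.length : Int) - (b.toList.length : Int)| := abs_nonneg _
              omega
            · omega

-- ===== VERDICT (by name: the statement is the Claim_ definition above) =====
theorem levenshtein_bound_py_spec : Claim_equal_levenshtein_bound_py := by
  intro a b max_edits _
  unfold Spec_levenshtein_bound_py
  exact pvFinal a b max_edits
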